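-- pv_equiv track=rewrite | github.com/rustbucket7/enigma_cipher_machine | enigma.py | check_rotor_choices
-- ===== SOURCE A (Python) =====
-- def check_rotor_choices(rotor_choices: tuple):
--     """
--     Check if rotor_choices are valid.
--
--     :param rotor_choices: tuple[int]
--     :return: bool
--     """
--
--     # if 3 rotors were not chosen, return False
--     if len(rotor_choices) != 3:
--         return False
--
--     rotors_used = set()
--     for rotor in rotor_choices:
--         # if rotor is not an int, return False
--         if not isinstance(rotor, int):
--             return False
--
--         # if rotor is not numbered 1-5, return False
--         elif rotor < 1 or rotor > 5:
--             return False
--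
--         # else if a rotor repeats, return False
--         elif rotor in rotors_used:
--             return False
--
--         else:
--             rotors_used.add(rotor)
--
--     # if rotor_choices are all valid, return True
--     return True
-- ===== SOURCE B (Python) =====
-- def check_rotor_choices(rotor_choices: tuple):
--     if len(rotor_choices) != 3:
--         return False
--     if not all(isinstance(r, int) for r in rotor_choices):
--         return False
--     lo, mid, hi = sorted(rotor_choices)
--     # a strictly increasing sorted chain inside 1..5 means: all in range and no repeats
--     return 1 <= lo < mid < hi <= 5
-- ===== Notes on version B (the rewrite author's own statement) =====
-- stated objective: alternative
-- what changed: Replaces A's single pass that range-checks each rotor and detects repeats with an incrementally grown membership set by sorting the triple and testing one strictly increasing chain 1 <= lo < mid < hi <= 5, which encodes both range validity and distinctness at once.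
import Mathlib
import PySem

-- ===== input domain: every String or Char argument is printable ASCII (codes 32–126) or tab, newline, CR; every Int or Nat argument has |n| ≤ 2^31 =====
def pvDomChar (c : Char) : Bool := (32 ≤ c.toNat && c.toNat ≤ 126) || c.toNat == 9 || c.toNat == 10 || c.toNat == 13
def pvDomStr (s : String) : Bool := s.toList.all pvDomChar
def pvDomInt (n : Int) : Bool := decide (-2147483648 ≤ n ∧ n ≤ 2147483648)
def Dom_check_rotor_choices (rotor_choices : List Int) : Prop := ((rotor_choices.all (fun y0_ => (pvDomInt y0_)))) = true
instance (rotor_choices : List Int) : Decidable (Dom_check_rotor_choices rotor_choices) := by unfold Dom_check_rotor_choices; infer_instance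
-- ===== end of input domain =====

-- B sorts the triple and tests one strictly increasing chain 1 <= lo < mid < hi <= 5 instead of A's loop with a membership set (alternative decomposition).


-- ===== PORT A =====
-- the for-loop of A over rotor_choices, carrying the set rotors_used (the isinstance check is trivially true for Int)
def check_rotor_choices_loop (rs : List Int) (rotors_used : PySem.Set Int) : Bool :=
  match rs with
  | [] => true
  | rotor :: rest =>
    if rotor < 1 ∨ rotor > 5 then false
    else if PySem.Set.contains rotors_used rotor then false
    else check_rotor_choices_loop rest (PySem.Set.add rotors_used rotor)

def check_rotor_choices (rotor_choices : List Int) : Bool :=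
  if rotor_choices.length ≠ 3 then false
  else check_rotor_choices_loop rotor_choices PySem.Set.empty

-- ===== PORT B =====
-- B: length guard, (trivially true isinstance pass on Int), then sorted(...) destructured and one strict chain test
def check_rotor_choices_alt (rotor_choices : List Int) : Bool :=
  if rotor_choices.length ≠ 3 then false
  else
    match PySem.List.sorted rotor_choices (fun x => x) false with
    | [lo, mid, hi] => 1 ≤ lo && lo < mid && mid < hi && hi ≤ 5
    | _ => false

-- ===== PRECONDITION & SPEC =====
def Spec_check_rotor_choices (rotor_choices : List Int) (out : Bool) : Prop := out = check_rotor_choices_alt rotor_choices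
instance (rotor_choices : List Int) (out : Bool) : Decidable (Spec_check_rotor_choices rotor_choices out) := by unfold Spec_check_rotor_choices; infer_instance

-- ===== CLAIM =====
def Claim_equal_check_rotor_choices : Prop := ∀ (rotor_choices : List Int), Dom_check_rotor_choices rotor_choices → Spec_check_rotor_choices rotor_choices (check_rotor_choices rotor_choices)

-- ===== LEMMAS AND PROOFS =====

-- ===== VERDICT =====
theorem check_rotor_choices_spec : Claim_equal_check_rotor_choices := by
  intro rs _
  unfold Spec_check_rotor_choices
  match rs with
  | [] => rfl
  | [a] => rfl
  | [a, b] => rfl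
  | a :: b :: c :: d :: t => simp [check_rotor_choices, check_rotor_choices_alt]
  | [a, b, c] =>
    simp only [check_rotor_choices, check_rotor_choices_alt, check_rotor_choices_loop,
      PySem.Set.contains, PySem.Set.add, PySem.Set.empty,
      PySem.List.sorted, PySem.List.insertBy, List.foldl]
    split_ifs <;> simp only [PySem.List.insertBy] <;> split_ifs <;> simp_all <;> omega
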